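-- pv_equiv track=rewrite | github.com/TakumaMiwa/algorithm | hash/smallest_subarray_sequentiially.py | smallest_subarray_sequentially
-- ===== SOURCE A (Python) =====
-- from collections import namedtuple
--
-- def smallest_subarray_sequentially(l, keywords):
--     Subarray = namedtuple('Subarray', ('start', 'end'))
--     keyword_to_idx = {k: i for i, k in enumerate(keywords)}
--     latest_occurrence = [-1] * len(keywords)
--     shortest_subarray_length = [float('inf')] * len(keywords)
--     min_distance = float('inf')
--     result = (-1, -1)
--
--     for i, word in enumerate(l):
--         if word in keyword_to_idx:
--             keyword_idx = keyword_to_idx[word]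
--             if keyword_idx==0:
--                 shortest_subarray_length[keyword_idx] = 1
--             elif shortest_subarray_length[keyword_idx - 1] != float('inf'):
--                 distance_to_previous_keyword = i - latest_occurrence[keyword_idx-1]
--                 shortest_subarray_length[keyword_idx] = distance_to_previous_keyword + shortest_subarray_length[keyword_idx-1]
--             latest_occurrence[keyword_idx] = i
--
--
--             if (keyword_idx==len(keywords)-1 and shortest_subarray_length[-1] < min_distance):
--                 min_distance = shortest_subarray_length[-1]
--                 result = Subarray(i-min_distance+1, i)
--     return result
-- ===== SOURCE B (Python) =====
-- from collections import namedtuple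
--
-- def smallest_subarray_sequentially(l, keywords):
--     Subarray = namedtuple('Subarray', ('start', 'end'))
--     keyword_to_idx = {k: i for i, k in enumerate(keywords)}
--     m = len(keywords)
--     if m == 0:
--         return (-1, -1)
--     # Phase 1: bucket the occurrence positions of each (mapped) keyword.
--     occ = [[] for _ in range(m)]
--     for i, word in enumerate(l):
--         idx = keyword_to_idx.get(word)
--         if idx is not None:
--             occ[idx].append(i)
--     # Phase 2: level by level, merge occurrence lists with a two-pointer sweep;
--     # chains holds (end, start) of the greedy chain of keywords 0..k ending at each
--     # occurrence of keyword k that completes one, in increasing end order.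
--     chains = [(j, j) for j in occ[0]]
--     for k in range(1, m):
--         merged = []
--         t = 0
--         last = None
--         for j in occ[k]:
--             while t < len(chains) and chains[t][0] < j:
--                 last = chains[t][1]
--                 t += 1
--             if last is not None:
--                 merged.append((j, last))
--         chains = merged
--     # Phase 3: pick the first strictly shortest full chain.
--     best = None
--     result = (-1, -1)
--     for j, s in chains:
--         length = j - s + 1
--         if best is None or length < best:
--             best = length
--             result = Subarray(s, j)
--     return result
-- ===== Notes on version B (the rewrite author's own statement) =====
-- stated objective: alternative
-- what changed: Replaces A's single-pass DP over l (latest_occurrence + shortest_subarray_length arrays updated per word) by a staged algorithm: bucket the occurrence positions of each keyword in one pass, then merge the levels' occurrence lists pairwise with a two-pointer sweep to propagate greedy chain starts, then scan the completed chains for the first strictly shortest one.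
import Mathlib
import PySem

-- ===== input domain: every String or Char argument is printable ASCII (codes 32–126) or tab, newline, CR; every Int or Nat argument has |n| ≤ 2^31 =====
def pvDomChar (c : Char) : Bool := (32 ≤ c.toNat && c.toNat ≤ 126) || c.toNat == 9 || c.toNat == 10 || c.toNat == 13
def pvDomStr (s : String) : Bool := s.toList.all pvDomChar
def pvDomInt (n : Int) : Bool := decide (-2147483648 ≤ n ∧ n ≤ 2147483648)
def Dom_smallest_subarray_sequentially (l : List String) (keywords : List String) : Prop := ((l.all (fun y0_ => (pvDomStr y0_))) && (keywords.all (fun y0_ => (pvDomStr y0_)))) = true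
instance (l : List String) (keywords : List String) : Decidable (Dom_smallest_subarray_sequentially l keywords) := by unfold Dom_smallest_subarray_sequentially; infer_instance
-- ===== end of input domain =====

-- B replaces A's single-pass DP by a staged algorithm (bucket keyword occurrences, merge the
-- levels with a two-pointer sweep, scan the completed chains); objective: alternative.
-- Equivalence is about the returned pair (Python A returns a namedtuple on success).

-- ===== PORT A =====
-- A's shortest_subarray_length entries and min_distance are either float('inf') or an int:
-- modelled as Option Int with none = float('inf').  pyInfLt a m is Python's 'a < m' on these
-- values (inf < x is False, x < inf is True) — exact for the values occurring in A.
def pyInfLt : Option Int → Option Int → Bool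
  | none, _ => false
  | some _, none => true
  | some a, some b => a < b

-- the body of A's 'for i, word in enumerate(l)' loop; state = (latest_occurrence,
-- shortest_subarray_length, min_distance, result).  All list indices that occur are in
-- range (dict values are enumerate indices < len(keywords)), so pyGetD/pySetD are exact.
def stepA (n : Nat) (kidx : PySem.Dict String Int)
    (st : List Int × List (Option Int) × Option Int × (Int × Int)) (p : Int × String) :
    List Int × List (Option Int) × Option Int × (Int × Int) :=
  match kidx.get? p.2 with
  | none => st
  | some keyword_idx =>
    let latest := st.1
    let shortest := st.2.1
    let min_distance := st.2.2.1
    let result := st.2.2.2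
    let shortest :=
      if keyword_idx = 0 then PySem.List.pySetD shortest keyword_idx (some 1)
      else
        match PySem.List.pyGetD shortest (keyword_idx - 1) none with
        | none => shortest
        | some len_prev =>
          let distance_to_previous_keyword :=
            p.1 - PySem.List.pyGetD latest (keyword_idx - 1) 0
          PySem.List.pySetD shortest keyword_idx
            (some (distance_to_previous_keyword + len_prev))
    let latest := PySem.List.pySetD latest keyword_idx p.1
    if keyword_idx = (n : Int) - 1 ∧
        pyInfLt (PySem.List.pyGetD shortest (-1) none) min_distance = true then
      match PySem.List.pyGetD shortest (-1) none with
      | none => (latest, shortest, min_distance, result)  -- unreachable: pyInfLt none _ = false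
      | some m => (latest, shortest, some m, (p.1 - m + 1, p.1))
    else (latest, shortest, min_distance, result)

def smallest_subarray_sequentially (l : List String) (keywords : List String) : Int × Int :=
  let keyword_to_idx : PySem.Dict String Int :=
    (PySem.List.enumerate keywords).foldl (fun d p => d.insert p.2 p.1) PySem.Dict.empty
  let st := (PySem.List.enumerate l).foldl (stepA keywords.length keyword_to_idx)
    (List.replicate keywords.length (-1), List.replicate keywords.length none, none, (-1, -1))
  st.2.2.2

-- ===== PORT B =====
-- phase 1: one pass bucketing each word's position into occ[keyword_to_idx[word]]
def stepOcc (kidx : PySem.Dict String Int) (occ : List (List Int)) (p : Int × String) :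
    List (List Int) :=
  match kidx.get? p.2 with
  | none => occ
  | some idx => PySem.List.pySetD occ idx (PySem.List.pyGetD occ idx [] ++ [p.1])

-- phase 2 inner merge: Source B's 'for j in occ[k]: while t < len(chains) and chains[t][0] < j: …'
-- two-pointer sweep, transliterated with the while loop as the (e < j) recursive branch.
def mergeChains : List Int → List (Int × Int) → Option Int → List (Int × Int)
  | [], _, _ => []
  | j :: js, (e, s) :: ch, last =>
    if e < j then mergeChains (j :: js) ch (some s)
    else
      match last with
      | some s0 => (j, s0) :: mergeChains js ((e, s) :: ch) last
      | none => mergeChains js ((e, s) :: ch) last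
  | j :: js, [], last =>
    match last with
    | some s0 => (j, s0) :: mergeChains js [] last
    | none => mergeChains js [] last
termination_by js ch _ => js.length + ch.length

-- phase 3 body: 'if best is None or length < best'
def pickStep (st : Option Int × (Int × Int)) (q : Int × Int) : Option Int × (Int × Int) :=
  let length := q.1 - q.2 + 1
  match st.1 with
  | none => (some length, (q.2, q.1))
  | some b => if length < b then (some length, (q.2, q.1)) else st

def smallest_subarray_sequentially_alt (l : List String) (keywords : List String) : Int × Int :=
  let keyword_to_idx : PySem.Dict String Int :=
    (PySem.List.enumerate keywords).foldl (fun d p => d.insert p.2 p.1) PySem.Dict.empty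
  let m := keywords.length
  if m = 0 then (-1, -1)
  else
    let occ := (PySem.List.enumerate l).foldl (stepOcc keyword_to_idx)
      (List.replicate m ([] : List Int))
    let chains0 := (PySem.List.pyGetD occ 0 []).map (fun j => (j, j))
    let chains := (PySem.List.pyRange 1 (m : Int) 1).foldl
      (fun ch k => mergeChains (PySem.List.pyGetD occ k []) ch none) chains0
    (chains.foldl pickStep (none, (-1, -1))).2

-- ===== PRECONDITION & SPEC =====
def Spec_smallest_subarray_sequentially (l : List String) (keywords : List String) (out : Int × Int) : Prop := out = smallest_subarray_sequentially_alt l keywords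
instance (l : List String) (keywords : List String) (out : Int × Int) : Decidable (Spec_smallest_subarray_sequentially l keywords out) := by unfold Spec_smallest_subarray_sequentially; infer_instance

-- ===== CLAIM (what is proved, stated in full; the proofs are below) =====
def Claim_equal_smallest_subarray_sequentially : Prop := ∀ (l : List String) (keywords : List String), Dom_smallest_subarray_sequentially l keywords → Spec_smallest_subarray_sequentially l keywords (smallest_subarray_sequentially l keywords)

-- ===== LEMMAS AND PROOFS =====

-- getD after set
theorem pvGetD_set_self {α : Type} (xs : List α) (k : Nat) (v d : α) (h : k < xs.length) :
    (xs.set k v).getD k d = v := by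
  simp [List.getD, h]

theorem pvGetD_set_ne {α : Type} (xs : List α) (k j : Nat) (v d : α) (h : j ≠ k) :
    (xs.set k v).getD j d = xs.getD j d := by
  simp [List.getD, (Ne.symm h : k ≠ j)]

theorem pvSetD_natCast {α : Type} (xs : List α) (k : Nat) (v : α) (h : k < xs.length) :
    PySem.List.pySetD xs (k : Int) v = xs.set k v := by
  rw [PySem.List.pySetD, PySem.List.pySet?_natCast xs k v h]; rfl

theorem pvGetD_neg_one {α : Type} (xs : List α) (k : Nat) (d : α) (h : k + 1 = xs.length) :
    PySem.List.pyGetD xs (-1) d = xs.getD k d := by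
  rw [show ((-1 : Int)) = -((1 : Nat) : Int) by norm_num,
    PySem.List.pyGetD_neg_natCast xs 1 d (by omega) (by omega)]
  simp [List.getD, show xs.length - 1 = k by omega]
  rw [List.getElem?_eq_getElem (show k < xs.length by omega)]; rfl

-- every value of the keyword_to_idx dict is an enumerate index: 0 ≤ j < s + len(ws)
theorem pvDictValuesBound (ws : List String) (s : Int) (hs : 0 ≤ s)
    (d : PySem.Dict String Int) (w : String) (j : Int)
    (hd : ∀ w j, d.get? w = some j → 0 ≤ j ∧ j < s)
    (h : ((PySem.List.enumerate ws s).foldl (fun d p => d.insert p.2 p.1) d).get? w = some j) :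
    0 ≤ j ∧ j < s + ws.length := by
  induction ws generalizing s d with
  | nil =>
    simp [PySem.List.enumerate_nil] at h
    have := hd w j h; omega
  | cons w0 ws ih =>
    rw [PySem.List.enumerate_cons] at h
    simp only [List.foldl_cons] at h
    have := ih (s + 1) (by omega) (d.insert w0 s)
      (fun w' j' h' => by
        by_cases hw : w' = w0
        · subst hw; rw [PySem.Dict.get?_insert_self] at h'
          have : s = j' := by injection h'
          omega
        · simp only [PySem.Dict.get?_insert, if_neg hw] at h'
          have := hd w' j' h'; omega) h
    simp only [List.length_cons]
    push_cast at this ⊢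
    omega

-- spec-side description of B's structures, used to relate the two ports
def specOcc (kidx : PySem.Dict String Int) (k : Int) (ps : List (Int × String)) : List Int :=
  ps.filterMap (fun p => if kidx.get? p.2 = some k then some p.1 else none)

def chainsAt (kidx : PySem.Dict String Int) (ps : List (Int × String)) : Nat → List (Int × Int)
  | 0 => (specOcc kidx 0 ps).map (fun j => (j, j))
  | k + 1 => mergeChains (specOcc kidx ((k : Int) + 1) ps) (chainsAt kidx ps k) none

-- what one new, largest occurrence appends to a chain level
def tailExt (i : Int) (ch : List (Int × Int)) (last : Option Int) : List (Int × Int) :=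
  match ch.getLast? with
  | some q => [(i, q.2)]
  | none => match last with | some s0 => [(i, s0)] | none => []

theorem tailExt_nil_none (i : Int) : tailExt i [] none = [] := rfl
theorem tailExt_nil_some (i : Int) (s0 : Int) : tailExt i [] (some s0) = [(i, s0)] := rfl
theorem tailExt_cons (i : Int) (q : Int × Int) (ch : List (Int × Int)) (last : Option Int) :
    tailExt i (q :: ch) last = tailExt i ch (some q.2) := by
  cases ch with
  | nil => rfl
  | cons q' ch' =>
    show tailExt i (q :: q' :: ch') last = tailExt i (q' :: ch') (some q.2)
    unfold tailExt
    rw [List.getLast?_cons_cons]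
    cases h : (q' :: ch').getLast? with
    | none => simp [List.getLast?_eq_none_iff] at h
    | some r => rfl

theorem mergeChains_nil_ch_none : ∀ (js : List Int), mergeChains js [] none = [] := by
  intro js; induction js with
  | nil => simp [mergeChains]
  | cons j js ih => rw [mergeChains]; exact ih

-- one-step unfoldings of the sweep
theorem mergeChains_nil (ch : List (Int × Int)) (last : Option Int) :
    mergeChains [] ch last = [] := by
  rw [mergeChains.eq_def]

theorem mergeChains_cons_cons_lt (j e s : Int) (js : List Int) (ch : List (Int × Int))
    (last : Option Int) (h : e < j) :
    mergeChains (j :: js) ((e, s) :: ch) last = mergeChains (j :: js) ch (some s) := by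
  rw [mergeChains.eq_def]; simp [h]

theorem mergeChains_cons_cons_ge_some (j e s s0 : Int) (js : List Int)
    (ch : List (Int × Int)) (h : ¬ e < j) :
    mergeChains (j :: js) ((e, s) :: ch) (some s0) =
      (j, s0) :: mergeChains js ((e, s) :: ch) (some s0) := by
  rw [mergeChains.eq_def]; simp [h]

theorem mergeChains_cons_cons_ge_none (j e s : Int) (js : List Int)
    (ch : List (Int × Int)) (h : ¬ e < j) :
    mergeChains (j :: js) ((e, s) :: ch) none = mergeChains js ((e, s) :: ch) none := by
  rw [mergeChains.eq_def]; simp [h]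

theorem mergeChains_cons_nil_some (j s0 : Int) (js : List Int) :
    mergeChains (j :: js) [] (some s0) = (j, s0) :: mergeChains js [] (some s0) := by
  rw [mergeChains.eq_def]

theorem mergeChains_cons_nil_none (j : Int) (js : List Int) :
    mergeChains (j :: js) [] none = mergeChains js [] none := by
  rw [mergeChains.eq_def]

theorem mergeChains_mem (js : List Int) (ch : List (Int × Int)) (last : Option Int) :
    ∀ q ∈ mergeChains js ch last, q.1 ∈ js := by
  fun_induction mergeChains js ch last with
  | case1 _ _ => simp
  | case2 _ _ _ _ _ _ _ ih => exact ih
  | case3 _ _ _ _ _ _ _ ih =>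
    intro q hq
    rcases List.mem_cons.mp hq with h | h
    · subst h; exact List.mem_cons_self ..
    · exact List.mem_cons_of_mem _ (ih q h)
  | case4 _ _ _ _ _ _ ih => exact fun q hq => List.mem_cons_of_mem _ (ih q hq)
  | case5 _ _ _ ih =>
    intro q hq
    rcases List.mem_cons.mp hq with h | h
    · subst h; exact List.mem_cons_self ..
    · exact List.mem_cons_of_mem _ (ih q h)
  | case6 _ _ ih => exact fun q hq => List.mem_cons_of_mem _ (ih q hq)

-- appending one occurrence i larger than everything appends tailExt at that level
theorem mergeChains_append_big (i : Int) : ∀ (n : Nat) (js : List Int)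
    (ch : List (Int × Int)) (last : Option Int), js.length + ch.length ≤ n →
    (∀ j ∈ js, j < i) → (∀ q ∈ ch, q.1 < i) →
    mergeChains (js ++ [i]) ch last = mergeChains js ch last ++ tailExt i ch last := by
  intro n
  induction n with
  | zero =>
    intro js ch last hn hjs hch
    obtain rfl : js = [] := List.length_eq_zero_iff.mp (by omega)
    obtain rfl : ch = [] := List.length_eq_zero_iff.mp (Nat.le_zero.mp (by simpa using hn))
    cases last with
    | none => simp [mergeChains_nil, mergeChains_cons_nil_none, tailExt_nil_none]
    | some s0 =>
      simp [mergeChains_nil, mergeChains_cons_nil_some, tailExt_nil_some]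
  | succ n ih =>
    intro js ch last hn hjs hch
    match js, ch with
    | [], [] =>
      cases last with
      | none => simp [mergeChains_nil, mergeChains_cons_nil_none, tailExt_nil_none]
      | some s0 =>
        simp [mergeChains_nil, mergeChains_cons_nil_some, tailExt_nil_some]
    | [], (e, s) :: ch' =>
      have he : e < i := hch (e, s) (by simp)
      rw [List.nil_append]
      have hI := ih [] ch' (some s) (by simp at hn ⊢; omega) (by simp)
        (fun q hq => hch q (by simp [hq]))
      rw [List.nil_append] at hI
      rw [mergeChains_cons_cons_lt i e s [] ch' last he, hI,
        mergeChains_nil, mergeChains_nil, tailExt_cons]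
    | j :: js', (e, s) :: ch' =>
      have hj : j < i := hjs j (by simp)
      rw [List.cons_append]
      by_cases hlt : e < j
      · have hI := ih (j :: js') ch' (some s) (by simp at hn ⊢; omega) hjs
          (fun q hq => hch q (by simp [hq]))
        rw [List.cons_append] at hI
        rw [mergeChains_cons_cons_lt j e s (js' ++ [i]) ch' last hlt, hI,
          mergeChains_cons_cons_lt j e s js' ch' last hlt, tailExt_cons]
      · cases last with
        | some s0 =>
          have hI := ih js' ((e, s) :: ch') (some s0) (by simp at hn ⊢; omega)
            (fun x hx => hjs x (by simp [hx])) hch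
          rw [mergeChains_cons_cons_ge_some j e s s0 (js' ++ [i]) ch' hlt, hI,
            mergeChains_cons_cons_ge_some j e s s0 js' ch' hlt]
          simp
        | none =>
          have hI := ih js' ((e, s) :: ch') none (by simp at hn ⊢; omega)
            (fun x hx => hjs x (by simp [hx])) hch
          rw [mergeChains_cons_cons_ge_none j e s (js' ++ [i]) ch' hlt, hI,
            mergeChains_cons_cons_ge_none j e s js' ch' hlt]
    | j :: js', [] =>
      rw [List.cons_append]
      cases last with
      | some s0 =>
        have hI := ih js' [] (some s0) (by simp at hn ⊢; omega)
          (fun x hx => hjs x (by simp [hx])) (by simp)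
        rw [mergeChains_cons_nil_some j s0 (js' ++ [i]), hI,
          mergeChains_cons_nil_some j s0 js']
        simp
      | none =>
        have hI := ih js' [] none (by simp at hn ⊢; omega)
          (fun x hx => hjs x (by simp [hx])) (by simp)
        rw [mergeChains_cons_nil_none j (js' ++ [i]), hI,
          mergeChains_cons_nil_none j js']

theorem mergeChains_ch_append_big (i s : Int) : ∀ (n : Nat) (js : List Int)
    (ch : List (Int × Int)) (last : Option Int), js.length + ch.length ≤ n →
    (∀ j ∈ js, j < i) →
    mergeChains js (ch ++ [(i, s)]) last = mergeChains js ch last := by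
  intro n
  induction n with
  | zero =>
    intro js ch last hn hjs
    obtain rfl : js = [] := List.length_eq_zero_iff.mp (by omega)
    rw [mergeChains_nil, mergeChains_nil]
  | succ n ih =>
    intro js ch last hn hjs
    match js, ch with
    | [], ch => rw [mergeChains_nil, mergeChains_nil]
    | j :: js', (e, s') :: ch' =>
      have hj : j < i := hjs j (by simp)
      by_cases hlt : e < j
      · rw [show ((e, s') :: ch') ++ [(i, s)] = (e, s') :: (ch' ++ [(i, s)]) from rfl,
          mergeChains_cons_cons_lt _ _ _ _ _ _ hlt,
          mergeChains_cons_cons_lt _ _ _ _ _ _ hlt,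
          ih (j :: js') ch' (some s') (by simp at hn ⊢; omega) hjs]
      · cases last with
        | some s0 =>
          rw [show ((e, s') :: ch') ++ [(i, s)] = (e, s') :: (ch' ++ [(i, s)]) from rfl,
            mergeChains_cons_cons_ge_some _ _ _ _ _ _ hlt,
            mergeChains_cons_cons_ge_some _ _ _ _ _ _ hlt,
            show (e, s') :: (ch' ++ [(i, s)]) = ((e, s') :: ch') ++ [(i, s)] from rfl,
            ih js' ((e, s') :: ch') (some s0) (by simp at hn ⊢; omega)
              (fun x hx => hjs x (by simp [hx]))]
        | none =>
          rw [show ((e, s') :: ch') ++ [(i, s)] = (e, s') :: (ch' ++ [(i, s)]) from rfl,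
            mergeChains_cons_cons_ge_none _ _ _ _ _ hlt,
            mergeChains_cons_cons_ge_none _ _ _ _ _ hlt,
            show (e, s') :: (ch' ++ [(i, s)]) = ((e, s') :: ch') ++ [(i, s)] from rfl,
            ih js' ((e, s') :: ch') none (by simp at hn ⊢; omega)
              (fun x hx => hjs x (by simp [hx]))]
    | j :: js', [] =>
      have hj : j < i := hjs j (by simp)
      have hge : ¬ (i < j) := by omega
      cases last with
      | some s0 =>
        rw [show ([] : List (Int × Int)) ++ [(i, s)] = [(i, s)] from rfl,
          mergeChains_cons_cons_ge_some _ _ _ _ _ _ hge,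
          mergeChains_cons_nil_some,
          show ((i, s) : Int × Int) :: [] = [] ++ [(i, s)] from rfl,
          ih js' [] (some s0) (by simp at hn ⊢; omega)
            (fun x hx => hjs x (by simp [hx]))]
      | none =>
        rw [show ([] : List (Int × Int)) ++ [(i, s)] = [(i, s)] from rfl,
          mergeChains_cons_cons_ge_none _ _ _ _ _ hge,
          mergeChains_cons_nil_none,
          show ((i, s) : Int × Int) :: [] = [] ++ [(i, s)] from rfl,
          ih js' [] none (by simp at hn ⊢; omega)
            (fun x hx => hjs x (by simp [hx]))]

theorem specOcc_append (kidx : PySem.Dict String Int) (k : Int) (ps : List (Int × String))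
    (p : Int × String) :
    specOcc kidx k (ps ++ [p]) =
      specOcc kidx k ps ++ (if kidx.get? p.2 = some k then [p.1] else []) := by
  by_cases h : kidx.get? p.2 = some k <;> simp [specOcc, List.filterMap_append, h]

theorem mem_specOcc_lt (kidx : PySem.Dict String Int) (k i : Int) (ps : List (Int × String))
    (hlt : ∀ q ∈ ps, q.1 < i) : ∀ j ∈ specOcc kidx k ps, j < i := by
  intro j hj
  simp only [specOcc, List.mem_filterMap] at hj
  obtain ⟨p, hp, hif⟩ := hj
  split at hif
  · cases hif; exact hlt p hp
  · cases hif

theorem chainsAt_ends_lt (kidx : PySem.Dict String Int) (i : Int) (ps : List (Int × String))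
    (hlt : ∀ q ∈ ps, q.1 < i) (k : Nat) : ∀ q ∈ chainsAt kidx ps k, q.1 < i := by
  intro q hq
  cases k with
  | zero =>
    simp only [chainsAt, List.mem_map] at hq
    obtain ⟨j, hj, rfl⟩ := hq
    exact mem_specOcc_lt kidx 0 i ps hlt j hj
  | succ t =>
    have := mergeChains_mem _ _ _ q hq
    exact mem_specOcc_lt kidx _ i ps hlt q.1 this

theorem chainsAt_append_nomatch (kidx : PySem.Dict String Int) (ps : List (Int × String))
    (p : Int × String) (hget : kidx.get? p.2 = none) (k : Nat) :
    chainsAt kidx (ps ++ [p]) k = chainsAt kidx ps k := by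
  induction k with
  | zero => simp [chainsAt, specOcc_append, hget]
  | succ t ih => rw [chainsAt, chainsAt, specOcc_append, ih]; simp [hget]

theorem chainsAt_append_lt (kidx : PySem.Dict String Int) (ps : List (Int × String))
    (p : Int × String) (k0 : Nat) (hget : kidx.get? p.2 = some (k0 : Int)) :
    ∀ k : Nat, k < k0 → chainsAt kidx (ps ++ [p]) k = chainsAt kidx ps k := by
  intro k
  induction k with
  | zero =>
    intro h0
    simp [chainsAt, specOcc_append, hget]
    omega
  | succ t ih =>
    intro h
    have hcond : ¬ (kidx.get? p.2 = some ((t : Int) + 1)) := by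
      rw [hget]; simp; omega
    rw [chainsAt, chainsAt, specOcc_append, if_neg hcond, List.append_nil,
      ih (by omega)]

theorem chainsAt_append_self_zero (kidx : PySem.Dict String Int) (ps : List (Int × String))
    (p : Int × String) (hget : kidx.get? p.2 = some 0) :
    chainsAt kidx (ps ++ [p]) 0 = chainsAt kidx ps 0 ++ [(p.1, p.1)] := by
  simp [chainsAt, specOcc_append, hget]

theorem chainsAt_append_self_succ (kidx : PySem.Dict String Int) (ps : List (Int × String))
    (p : Int × String) (t : Nat) (hget : kidx.get? p.2 = some ((t : Int) + 1))
    (hlt : ∀ q ∈ ps, q.1 < p.1) :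
    chainsAt kidx (ps ++ [p]) (t + 1) =
      chainsAt kidx ps (t + 1) ++ tailExt p.1 (chainsAt kidx ps t) none := by
  rw [chainsAt, specOcc_append, if_pos hget,
    chainsAt_append_lt kidx ps p (t + 1) (by push_cast [hget]; ring_nf) t (by omega),
    mergeChains_append_big p.1
      ((specOcc kidx ((t : Int) + 1) ps).length + (chainsAt kidx ps t).length)
      _ _ none le_rfl (mem_specOcc_lt kidx _ p.1 ps hlt)
      (chainsAt_ends_lt kidx p.1 ps hlt t)]
  rfl

theorem chainsAt_append_gt (kidx : PySem.Dict String Int) (ps : List (Int × String))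
    (p : Int × String) (k0 : Nat) (hget : kidx.get? p.2 = some (k0 : Int))
    (hlt : ∀ q ∈ ps, q.1 < p.1) :
    ∀ d : Nat, chainsAt kidx (ps ++ [p]) (k0 + 1 + d) = chainsAt kidx ps (k0 + 1 + d) := by
  have hE : ∃ E, chainsAt kidx (ps ++ [p]) k0 = chainsAt kidx ps k0 ++ E ∧
      (E = [] ∨ ∃ s, E = [(p.1, s)]) := by
    cases k0 with
    | zero =>
      exact ⟨[(p.1, p.1)], chainsAt_append_self_zero kidx ps p (by exact_mod_cast hget),
        Or.inr ⟨p.1, rfl⟩⟩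
    | succ t =>
      refine ⟨tailExt p.1 (chainsAt kidx ps t) none,
        chainsAt_append_self_succ kidx ps p t (by push_cast at hget ⊢; exact hget) hlt, ?_⟩
      cases hq : (chainsAt kidx ps t).getLast? with
      | none => exact Or.inl (by simp [tailExt, hq])
      | some q => exact Or.inr ⟨q.2, by simp [tailExt, hq]⟩
  intro d
  induction d with
  | zero =>
    obtain ⟨E, hEeq, hEshape⟩ := hE
    have hcond : ¬ (kidx.get? p.2 = some ((k0 : Int) + 1)) := by
      rw [hget]; simp only [Option.some.injEq]; omega
    rw [show k0 + 1 + 0 = k0 + 1 by omega, chainsAt, chainsAt, hEeq, specOcc_append,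
      if_neg hcond, List.append_nil]
    rcases hEshape with rfl | ⟨s, rfl⟩
    · rw [List.append_nil]
    · rw [mergeChains_ch_append_big p.1 s
        ((specOcc kidx ((k0 : Int) + 1) ps).length + (chainsAt kidx ps k0).length)
        _ _ none le_rfl (mem_specOcc_lt kidx _ p.1 ps hlt)]
  | succ d ih =>
    have hcond : ¬ (kidx.get? p.2 = some (((k0 + 1 + d : Nat) : Int) + 1)) := by
      rw [hget]; simp; push_cast; omega
    rw [show k0 + 1 + (d + 1) = (k0 + 1 + d) + 1 by omega, chainsAt, chainsAt, ih,
      specOcc_append, if_neg hcond, List.append_nil]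

theorem chainsAt_nil (kidx : PySem.Dict String Int) (k : Nat) :
    chainsAt kidx [] k = [] := by
  cases k with
  | zero => simp [chainsAt, specOcc]
  | succ t => simp [chainsAt, specOcc, mergeChains_nil]

-- the invariant tying A's loop state to B's staged structures on the processed prefix
def pvInv (kidx : PySem.Dict String Int) (m : Nat) (ps : List (Int × String))
    (st : List Int × List (Option Int) × Option Int × (Int × Int)) : Prop :=
  st.1.length = m ∧ st.2.1.length = m ∧
  (∀ k : Nat, k < m →
    st.2.1.getD k none = (chainsAt kidx ps k).getLast?.map (fun q => q.1 - q.2 + 1)) ∧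
  (∀ k : Nat, k < m → ∀ q, (chainsAt kidx ps k).getLast? = some q → st.1.getD k 0 = q.1) ∧
  (1 ≤ m → st.2.2 = (chainsAt kidx ps (m - 1)).foldl pickStep (none, (-1, -1)))

-- stepA on a matched word, with the updated shortest list supplied explicitly
theorem stepA_eq (n : Nat) (kidx : PySem.Dict String Int)
    (st : List Int × List (Option Int) × Option Int × (Int × Int)) (p : Int × String)
    (kI : Int) (hget : kidx.get? p.2 = some kI) (sh' : List (Option Int))
    (hsh' : sh' = (if kI = 0 then PySem.List.pySetD st.2.1 kI (some 1)
      else match PySem.List.pyGetD st.2.1 (kI - 1) none with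
        | none => st.2.1
        | some L => PySem.List.pySetD st.2.1 kI
            (some (p.1 - PySem.List.pyGetD st.1 (kI - 1) 0 + L)))) :
    stepA n kidx st p =
      (PySem.List.pySetD st.1 kI p.1, sh',
        if kI = (n : Int) - 1 ∧ pyInfLt (PySem.List.pyGetD sh' (-1) none) st.2.2.1 = true then
          match PySem.List.pyGetD sh' (-1) none with
          | none => (st.2.2.1, st.2.2.2)
          | some L => (some L, (p.1 - L + 1, p.1))
        else (st.2.2.1, st.2.2.2)) := by
  subst hsh'
  simp only [stepA, hget]
  rcases hv : PySem.List.pyGetD (if kI = 0 then PySem.List.pySetD st.2.1 kI (some 1)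
      else match PySem.List.pyGetD st.2.1 (kI - 1) none with
        | none => st.2.1
        | some L => PySem.List.pySetD st.2.1 kI
            (some (p.1 - PySem.List.pyGetD st.1 (kI - 1) 0 + L))) (-1) none with _ | L <;>
    simp only [hv] <;> split <;> rfl

theorem pvStepA_inv (kidx : PySem.Dict String Int) (m : Nat)
    (hdict : ∀ w j, kidx.get? w = some j → 0 ≤ j ∧ j < (m : Int))
    (ps : List (Int × String)) (p : Int × String) (hlt : ∀ q ∈ ps, q.1 < p.1)
    (st : List Int × List (Option Int) × Option Int × (Int × Int))
    (h : pvInv kidx m ps st) : pvInv kidx m (ps ++ [p]) (stepA m kidx st p) := by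
  obtain ⟨la, sh, mind, res⟩ := st
  obtain ⟨hla, hsh, hA, hB, hC⟩ := h
  simp only at hla hsh hA hB hC
  cases hget : kidx.get? p.2 with
  | none =>
    have hstep : stepA m kidx (la, sh, mind, res) p = (la, sh, mind, res) := by
      simp [stepA, hget]
    rw [hstep]
    refine ⟨hla, hsh, fun k hk => ?_, fun k hk q hq => ?_, fun hm => ?_⟩
    · rw [chainsAt_append_nomatch kidx ps p hget]; exact hA k hk
    · rw [chainsAt_append_nomatch kidx ps p hget] at hq; exact hB k hk q hq
    · rw [chainsAt_append_nomatch kidx ps p hget]; exact hC hm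
  | some idx =>
    obtain ⟨hidx0, hidxm⟩ := hdict p.2 idx hget
    obtain ⟨k0, rfl⟩ : ∃ k0 : Nat, idx = (k0 : Int) :=
      ⟨idx.toNat, (Int.toNat_of_nonneg hidx0).symm⟩
    have hk0 : k0 < m := by exact_mod_cast hidxm
    have hm1 : 1 ≤ m := by omega
    have hlow : ∀ k : Nat, k < k0 → chainsAt kidx (ps ++ [p]) k = chainsAt kidx ps k :=
      chainsAt_append_lt kidx ps p k0 hget
    have hgt : ∀ k : Nat, k0 < k → chainsAt kidx (ps ++ [p]) k = chainsAt kidx ps k := by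
      intro k hkgt
      have := chainsAt_append_gt kidx ps p k0 hget hlt (k - k0 - 1)
      rwa [show k0 + 1 + (k - k0 - 1) = k by omega] at this
    -- the new shortest list, the appended chain element, and the new slot value, per case
    obtain ⟨sh', E, hsh'def, hself, hlen', hslotE, hother, hshape⟩ :
        ∃ (sh' : List (Option Int)) (E : List (Int × Int)),
          (sh' = (if (k0 : Int) = 0 then PySem.List.pySetD sh (k0 : Int) (some 1)
            else match PySem.List.pyGetD sh ((k0 : Int) - 1) none with
              | none => sh
              | some L => PySem.List.pySetD sh (k0 : Int)
                  (some (p.1 - PySem.List.pyGetD la ((k0 : Int) - 1) 0 + L)))) ∧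
          chainsAt kidx (ps ++ [p]) k0 = chainsAt kidx ps k0 ++ E ∧
          sh'.length = m ∧
          (sh'.getD k0 none = ((chainsAt kidx ps k0 ++ E).getLast?).map
            (fun q => q.1 - q.2 + 1) ∧
           (∀ q : Int × Int, (chainsAt kidx ps k0 ++ E).getLast? = some q → q.1 = p.1)) ∧
          (∀ k : Nat, k ≠ k0 → sh'.getD k none = sh.getD k none) ∧
          (E = [] ∨ ∃ s, E = [(p.1, s)]) := by
      by_cases hz : k0 = 0
      · subst hz
        refine ⟨sh.set 0 (some 1), [(p.1, p.1)], ?_, ?_, by simpa using hsh, ⟨?_, ?_⟩, ?_,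
          Or.inr ⟨p.1, rfl⟩⟩
        · rw [if_pos (by norm_num), show (((0 : Nat) : Int)) = ((0 : Nat) : Int) from rfl,
            pvSetD_natCast sh 0 _ (by omega)]
        · exact chainsAt_append_self_zero kidx ps p (by exact_mod_cast hget)
        · rw [pvGetD_set_self sh 0 _ _ (by omega), List.getLast?_concat]; simp
        · intro q hq; rw [List.getLast?_concat] at hq; cases hq; rfl
        · intro k hk; exact pvGetD_set_ne sh 0 k _ _ hk
      · have ht : k0 - 1 + 1 = k0 := by omega
        have hcast : ((k0 : Int)) - 1 = ((k0 - 1 : Nat) : Int) := by omega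
        have hcast1 : (((k0 - 1 : Nat) : Int)) + 1 = ((k0 : Nat) : Int) := by omega
        have hself' := chainsAt_append_self_succ kidx ps p (k0 - 1)
          (by rw [hcast1]; exact hget) hlt
        rw [ht] at hself'
        have hAt := hA (k0 - 1) (by omega)
        cases hq : (chainsAt kidx ps (k0 - 1)).getLast? with
        | none =>
          have hchk0 : chainsAt kidx ps k0 = [] := by
            rw [show k0 = (k0 - 1) + 1 by omega, chainsAt,
              List.getLast?_eq_none_iff.mp hq, mergeChains_nil_ch_none]
          refine ⟨sh, [], ?_, ?_, hsh, ⟨?_, ?_⟩, fun k _ => rfl, Or.inl rfl⟩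
          · rw [if_neg (by omega), hcast, PySem.List.pyGetD_natCast, hAt, hq]
            rfl
          · rw [hself']; simp [tailExt, hq]
          · rw [hA k0 hk0, hchk0]; simp
          · intro q hq2; rw [hchk0] at hq2; simp at hq2
        | some q0 =>
          have hBt := hB (k0 - 1) (by omega) q0 hq
          refine ⟨sh.set k0 (some (p.1 - q0.2 + 1)), [(p.1, q0.2)], ?_, ?_,
            by simpa using hsh, ⟨?_, ?_⟩, ?_, Or.inr ⟨q0.2, rfl⟩⟩
          · rw [if_neg (by omega), hcast, PySem.List.pyGetD_natCast, hAt, hq]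
            show sh.set k0 (some (p.1 - q0.2 + 1)) =
              PySem.List.pySetD sh ((k0 : Nat) : Int)
                (some (p.1 - PySem.List.pyGetD la ((k0 - 1 : Nat) : Int) 0 + (q0.1 - q0.2 + 1)))
            rw [PySem.List.pyGetD_natCast, hBt, pvSetD_natCast sh k0 _ (by omega)]
            ring_nf
          · rw [hself']; simp [tailExt, hq]
          · rw [pvGetD_set_self sh k0 _ _ (by omega), List.getLast?_concat]; simp
          · intro q hq2; rw [List.getLast?_concat] at hq2; cases hq2; rfl
          · intro k hk; exact pvGetD_set_ne sh k0 k _ _ hk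
    have hstep := stepA_eq m kidx (la, sh, mind, res) p (k0 : Int) hget sh' hsh'def
    rw [hstep]
    have hla' : (PySem.List.pySetD la (k0 : Int) p.1) = la.set k0 p.1 :=
      pvSetD_natCast la k0 _ (by omega)
    refine ⟨by simp [hla', hla], hlen', fun k hk => ?_, fun k hk q hq => ?_, fun _ => ?_⟩
    · -- shortest invariant
      rcases Nat.lt_trichotomy k k0 with h | h | h
      · rw [hlow k h, hother k (by omega)]; exact hA k hk
      · subst h; rw [hself]; exact hslotE.1
      · rw [hgt k h, hother k (by omega)]; exact hA k hk
    · -- latest invariant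
      rcases Nat.lt_trichotomy k k0 with h | h | h
      · rw [hlow k h] at hq
        rw [hla', pvGetD_set_ne la k0 k _ _ (by omega)]; exact hB k hk q hq
      · subst h
        rw [hself] at hq
        rw [hla', pvGetD_set_self la k _ _ (by omega), hslotE.2 q hq]
      · rw [hgt k h] at hq
        rw [hla', pvGetD_set_ne la k0 k _ _ (by omega)]; exact hB k hk q hq
    · -- min/result invariant
      have hCold := hC hm1
      by_cases hlast : k0 = m - 1
      · subst hlast
        have hneg1 : PySem.List.pyGetD sh' (-1) none = sh'.getD (m - 1) none :=
          pvGetD_neg_one sh' (m - 1) none (by omega)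
        rw [hself, List.foldl_append]
        have hc1 : (((m - 1 : Nat) : Int)) = (m : Int) - 1 := by omega
        have hm' : mind = (List.foldl pickStep (none, (-1, -1))
            (chainsAt kidx ps (m - 1))).1 := congrArg Prod.fst hCold
        rcases hshape with rfl | ⟨s, rfl⟩
        · -- nothing appended: the slot is none, A's guard is false
          have hnone : sh'.getD (m - 1) none = none := by
            rw [hslotE.1]
            cases hq2 : (chainsAt kidx ps (m - 1) ++ ([] : List (Int × Int))).getLast? with
            | none => simp
            | some q =>
              rw [List.append_nil] at hq2
              have hmem : q ∈ chainsAt kidx ps (m - 1) := List.mem_of_getLast? hq2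
              have := chainsAt_ends_lt kidx p.1 ps hlt (m - 1) q hmem
              have := hslotE.2 q (by rw [List.append_nil]; exact hq2)
              omega
          rw [if_neg (by rintro ⟨-, hcon⟩; rw [hneg1, hnone] at hcon; exact absurd hcon (by simp [pyInfLt]))]
          simpa using hCold
        · -- one chain appended: A's check is exactly one pickStep
          have hvL : PySem.List.pyGetD sh' (-1) none = some (p.1 - s + 1) := by
            rw [hneg1, hslotE.1, List.getLast?_concat]; rfl
          rw [List.foldl_cons, List.foldl_nil]
          cases hF : (List.foldl pickStep (none, (-1, -1)) (chainsAt kidx ps (m - 1))).1 with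
          | none =>
            rw [if_pos ⟨hc1, by rw [hvL, hm', hF]; rfl⟩, hvL]
            simp only [pickStep, hF]
            rw [show p.1 - (p.1 - s + 1) + 1 = s from by ring]
          | some b =>
            by_cases hb : p.1 - s + 1 < b
            · rw [if_pos ⟨hc1, by rw [hvL, hm', hF]; simpa [pyInfLt] using hb⟩, hvL]
              simp only [pickStep, hF, if_pos hb]
              rw [show p.1 - (p.1 - s + 1) + 1 = s from by ring]
            · have hcon : ¬ ((((m - 1 : Nat) : Int)) = (m : Int) - 1 ∧
                  pyInfLt (PySem.List.pyGetD sh' (-1) none) mind = true) := by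
                rintro ⟨-, hcon⟩
                rw [hvL, hm', hF] at hcon
                simp [pyInfLt] at hcon
                omega
              rw [if_neg hcon]
              simp only [pickStep, hF, if_neg hb]
              exact hCold
      · have hcond : ¬ (((k0 : Nat) : Int) = (m : Int) - 1 ∧
            pyInfLt (PySem.List.pyGetD sh' (-1) none) mind = true) := by
          rintro ⟨hc, -⟩; omega
        rw [if_neg hcond]
        rcases Nat.lt_trichotomy (m - 1) k0 with h | h | h
        · rw [hlow (m - 1) h]; exact hCold
        · exact absurd h.symm hlast
        · rw [hgt (m - 1) h]; exact hCold

theorem pvFoldA_inv (kidx : PySem.Dict String Int) (m : Nat)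
    (hdict : ∀ w j, kidx.get? w = some j → 0 ≤ j ∧ j < (m : Int))
    (ps : List (Int × String)) (hps : List.Pairwise (fun p q : Int × String => p.1 < q.1) ps) :
    pvInv kidx m ps (ps.foldl (stepA m kidx)
      (List.replicate m (-1), List.replicate m none, none, (-1, -1))) := by
  induction ps using List.reverseRecOn with
  | nil =>
    refine ⟨by simp, by simp, ?_, ?_, ?_⟩
    · intro k hk; simp [chainsAt_nil]
    · intro k hk q hq; rw [chainsAt_nil] at hq; simp at hq
    · intro hm; simp [chainsAt_nil]
  | append_singleton ps p ih =>
    rcases List.pairwise_append.mp hps with ⟨h1, _, h2⟩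
    rw [List.foldl_append, List.foldl_cons, List.foldl_nil]
    exact pvStepA_inv kidx m hdict ps p (fun q hq => h2 q hq p (by simp)) _ (ih h1)

-- phase-1 fold computes the buckets
theorem pvOccFold (kidx : PySem.Dict String Int) (m : Nat)
    (hdict : ∀ w j, kidx.get? w = some j → 0 ≤ j ∧ j < (m : Int)) :
    ∀ (ps : List (Int × String)) (acc : List (List Int)), acc.length = m →
      (ps.foldl (stepOcc kidx) acc).length = m ∧
      ∀ k : Nat, k < m →
        (ps.foldl (stepOcc kidx) acc).getD k [] = acc.getD k [] ++ specOcc kidx (k : Int) ps := by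
  intro ps
  induction ps with
  | nil => exact fun acc hacc => ⟨hacc, fun k hk => by simp [specOcc]⟩
  | cons p ps ih =>
    intro acc hacc
    simp only [List.foldl_cons]
    cases hget : kidx.get? p.2 with
    | none =>
      have hstep : stepOcc kidx acc p = acc := by simp [stepOcc, hget]
      rw [hstep]
      refine ⟨(ih acc hacc).1, fun k hk => ?_⟩
      rw [(ih acc hacc).2 k hk]
      simp [specOcc, hget]
    | some idx =>
      obtain ⟨hidx0, hidxm⟩ := hdict p.2 idx hget
      obtain ⟨k0, rfl⟩ : ∃ k0 : Nat, idx = (k0 : Int) :=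
        ⟨idx.toNat, (Int.toNat_of_nonneg hidx0).symm⟩
      have hk0 : k0 < m := by exact_mod_cast hidxm
      have hstep : stepOcc kidx acc p = acc.set k0 (acc.getD k0 [] ++ [p.1]) := by
        simp only [stepOcc, hget, PySem.List.pyGetD_natCast,
          pvSetD_natCast acc k0 _ (by omega)]
      rw [hstep]
      have hacc' : (acc.set k0 (acc.getD k0 [] ++ [p.1])).length = m := by
        simpa using hacc
      refine ⟨(ih _ hacc').1, fun k hk => ?_⟩
      rw [(ih _ hacc').2 k hk]
      by_cases hkk : k = k0
      · subst hkk
        rw [pvGetD_set_self acc k _ _ (by omega)]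
        have : specOcc kidx (k : Int) (p :: ps) = p.1 :: specOcc kidx (k : Int) ps := by
          simp [specOcc, hget]
        rw [this]; simp
      · rw [pvGetD_set_ne acc k0 k _ _ hkk]
        have : specOcc kidx (k : Int) (p :: ps) = specOcc kidx (k : Int) ps := by
          have : ((k0 : Int)) ≠ (k : Int) := by exact_mod_cast Ne.symm hkk
          simp [specOcc, hget, this]
        rw [this]

-- phase-2 fold computes chainsAt (m-1)
theorem pvChainsFold (kidx : PySem.Dict String Int) (ps : List (Int × String))
    (occ : List (List Int)) (hocc : ∀ k : Nat, k < occ.length →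
      occ.getD k [] = specOcc kidx (k : Int) ps) :
    ∀ (m : Nat), 1 ≤ m → m ≤ occ.length →
      (PySem.List.pyRange 1 (m : Int) 1).foldl
        (fun ch k => mergeChains (PySem.List.pyGetD occ k []) ch none)
        ((specOcc kidx 0 ps).map (fun j => (j, j))) = chainsAt kidx ps (m - 1) := by
  intro m
  induction m with
  | zero => omega
  | succ t iht =>
    intro h1 hlen
    by_cases ht : t = 0
    · subst ht
      rw [show (((1 : Nat) : Int)) = 1 by norm_num,
        PySem.List.pyRange_one_eq_nil (by norm_num)]
      simp [chainsAt]
    · have ht1 : 1 ≤ t := by omega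
      rw [show ((t + 1 : Nat) : Int) = (t : Int) + 1 by push_cast; ring,
        PySem.List.pyRange_one_succ_right (by exact_mod_cast ht1),
        List.foldl_append, iht ht1 (by omega), List.foldl_cons, List.foldl_nil,
        PySem.List.pyGetD_natCast, hocc t (by omega)]
      conv_rhs => rw [show t = (t - 1) + 1 by omega]
      show _ = chainsAt kidx ps ((t - 1) + 1)
      rw [chainsAt]
      congr 1
      congr 1
      push_cast [Nat.cast_sub ht1]
      ring

-- with an empty keyword list the dict is empty and A's fold is the identity
theorem foldA_empty (n : Nat) (ps : List (Int × String))
    (st : List Int × List (Option Int) × Option Int × (Int × Int)) :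
    ps.foldl (stepA n PySem.Dict.empty) st = st := by
  induction ps generalizing st with
  | nil => rfl
  | cons p ps ih =>
    rw [List.foldl_cons, show stepA n PySem.Dict.empty st p = st by
      simp [stepA, PySem.Dict.get?_empty], ih]

-- ===== VERDICT (by name: the statement is the Claim_ definition above) =====
theorem smallest_subarray_sequentially_spec : Claim_equal_smallest_subarray_sequentially := by
  intro l keywords _
  unfold Spec_smallest_subarray_sequentially
  by_cases hm : keywords.length = 0
  · obtain rfl : keywords = [] := List.length_eq_zero_iff.mp hm
    show ((PySem.List.enumerate l).foldl
        (stepA ([] : List String).length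
          ((PySem.List.enumerate ([] : List String)).foldl
            (fun d p => d.insert p.2 p.1) PySem.Dict.empty))
        (List.replicate ([] : List String).length (-1),
          List.replicate ([] : List String).length none, none, (-1, -1))).2.2.2 =
      smallest_subarray_sequentially_alt l []
    rw [PySem.List.enumerate_nil, List.foldl_nil, foldA_empty]
    rfl
  · have hm1 : 1 ≤ keywords.length := Nat.pos_of_ne_zero hm
    have hdict : ∀ w j,
        (((PySem.List.enumerate keywords).foldl (fun d p => d.insert p.2 p.1)
          PySem.Dict.empty).get? w = some j) → 0 ≤ j ∧ j < (keywords.length : Int) := by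
      intro w j h
      have := pvDictValuesBound keywords 0 le_rfl PySem.Dict.empty w j
        (fun w' j' h' => by simp [PySem.Dict.get?_empty] at h') h
      simpa using this
    obtain ⟨hlen, hgetd⟩ := pvOccFold _ keywords.length hdict (PySem.List.enumerate l)
      (List.replicate keywords.length []) (by simp)
    obtain ⟨-, -, -, -, hres⟩ := pvFoldA_inv _ keywords.length hdict
      (PySem.List.enumerate l) (PySem.List.pairwise_lt_enumerate l 0)
    have hocc' : ∀ k : Nat,
        k < ((PySem.List.enumerate l).foldl
          (stepOcc ((PySem.List.enumerate keywords).foldl (fun d p => d.insert p.2 p.1)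
            PySem.Dict.empty)) (List.replicate keywords.length [])).length →
        ((PySem.List.enumerate l).foldl
          (stepOcc ((PySem.List.enumerate keywords).foldl (fun d p => d.insert p.2 p.1)
            PySem.Dict.empty)) (List.replicate keywords.length [])).getD k [] =
          specOcc ((PySem.List.enumerate keywords).foldl (fun d p => d.insert p.2 p.1)
            PySem.Dict.empty) (k : Int) (PySem.List.enumerate l) := by
      intro k hk
      rw [hgetd k (by omega)]
      simp
    have hch := pvChainsFold _ (PySem.List.enumerate l) _ hocc' keywords.length hm1
      (le_of_eq hlen.symm)
    show ((PySem.List.enumerate l).foldl (stepA keywords.length _)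
        (List.replicate keywords.length (-1),
          List.replicate keywords.length none, none, (-1, -1))).2.2.2 =
      (if keywords.length = 0 then ((-1 : Int), (-1 : Int))
       else (((PySem.List.pyRange 1 (keywords.length : Int) 1).foldl
          (fun ch k => mergeChains (PySem.List.pyGetD
            ((PySem.List.enumerate l).foldl
              (stepOcc ((PySem.List.enumerate keywords).foldl
                (fun d p => d.insert p.2 p.1) PySem.Dict.empty))
              (List.replicate keywords.length [])) k []) ch none)
          ((PySem.List.pyGetD
            ((PySem.List.enumerate l).foldl
              (stepOcc ((PySem.List.enumerate keywords).foldl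
                (fun d p => d.insert p.2 p.1) PySem.Dict.empty))
              (List.replicate keywords.length [])) 0 []).map (fun j => (j, j)))).foldl
          pickStep (none, (-1, -1))).2)
    rw [if_neg hm, hres hm1, PySem.List.pyGetD_zero, hgetd 0 (by omega)]
    simp only [show (List.replicate keywords.length ([] : List Int)).getD 0 [] = [] from by
        cases keywords.length <;> simp, Nat.cast_zero, List.nil_append]
    rw [hch]
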